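-- pv_equiv track=rewrite | github.com/sanketbhamare656/krishipredict_freelance | model.py | get_crop_season
-- ===== SOURCE A (Python) =====
-- def get_crop_season(crop_name):
--     """Get the suitable season for a crop"""
--     season_mapping = {
--         'Kharif': ['Jowar (Sorghum)', 'Bajra (Pearl Millet)', 'Rice', 'Tur (Pigeon Pea)',
--                   'Soybean', 'Cotton', 'Groundnut', 'Maize', 'Moong (Green Gram)', 'Urad (Black Gram)'],
--         'Rabi': ['Wheat', 'Chickpea', 'Sunflower', 'Safflower', 'Onion', 'Cabbage', 'Cauliflower', 'Potato'],
--         'Year-round': ['Sugarcane', 'Tomato', 'Brinjal', 'Grapes', 'Mango', 'Banana', 'Orange',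
--                       'Pomegranate', 'Sapota', 'Custard Apple', 'Guava', 'Papaya']
--     }
--
--     for season, crops in season_mapping.items():
--         if crop_name in crops:
--             return season
--     return 'Unknown'
-- ===== SOURCE B (Python) =====
-- # B: inverted crop->season index built once; the function is a single dict lookup.
-- _SEASON_MAPPING = {
--     'Kharif': ['Jowar (Sorghum)', 'Bajra (Pearl Millet)', 'Rice', 'Tur (Pigeon Pea)', 'Soybean', 'Cotton', 'Groundnut', 'Maize', 'Moong (Green Gram)', 'Urad (Black Gram)'],
--     'Rabi': ['Wheat', 'Chickpea', 'Sunflower', 'Safflower', 'Onion', 'Cabbage', 'Cauliflower', 'Potato'],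
--     'Year-round': ['Sugarcane', 'Tomato', 'Brinjal', 'Grapes', 'Mango', 'Banana', 'Orange', 'Pomegranate', 'Sapota', 'Custard Apple', 'Guava', 'Papaya'],
-- }
--
-- _CROP_TO_SEASON = {crop: season for season, cs in _SEASON_MAPPING.items() for crop in cs}
--
-- def get_crop_season(crop_name):
--     return _CROP_TO_SEASON.get(crop_name, 'Unknown')
-- ===== Notes on version B (the rewrite author's own statement) =====
-- stated objective: simpler
-- what changed: Replaced the per-season membership-scan loop with an inverted crop-to-season dict built once at module level; the function body is a single dict .get with the same fallback default for unrecognised crops.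
import Mathlib
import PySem

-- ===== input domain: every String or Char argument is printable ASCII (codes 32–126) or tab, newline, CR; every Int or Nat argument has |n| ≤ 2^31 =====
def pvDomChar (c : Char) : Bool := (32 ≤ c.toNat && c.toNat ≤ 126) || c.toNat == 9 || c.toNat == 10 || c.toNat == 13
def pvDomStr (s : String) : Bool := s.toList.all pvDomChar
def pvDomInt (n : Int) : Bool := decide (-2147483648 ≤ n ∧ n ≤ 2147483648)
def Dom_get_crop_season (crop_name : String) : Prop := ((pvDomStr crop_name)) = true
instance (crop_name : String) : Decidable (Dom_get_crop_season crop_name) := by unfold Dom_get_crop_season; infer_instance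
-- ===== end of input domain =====

-- B replaces A's season-by-season list scan with a prebuilt inverted crop→season dict and one lookup (simpler).

-- ===== PORT A =====
def seasonMapping : PySem.Dict String (List String) := PySem.Dict.ofList [
  ("Kharif", ["Jowar (Sorghum)", "Bajra (Pearl Millet)", "Rice", "Tur (Pigeon Pea)", "Soybean", "Cotton", "Groundnut", "Maize", "Moong (Green Gram)", "Urad (Black Gram)"]),
  ("Rabi", ["Wheat", "Chickpea", "Sunflower", "Safflower", "Onion", "Cabbage", "Cauliflower", "Potato"]),
  ("Year-round", ["Sugarcane", "Tomato", "Brinjal", "Grapes", "Mango", "Banana", "Orange", "Pomegranate", "Sapota", "Custard Apple", "Guava", "Papaya"]),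
]

-- the 'for season, crops in season_mapping.items(): if crop_name in crops: return season' loop
def seasonLoop (crop_name : String) : List (String × List String) → String
  | [] => "Unknown"
  | (season, crops) :: rest =>
      if crops.contains crop_name then season else seasonLoop crop_name rest

def get_crop_season (crop_name : String) : String :=
  seasonLoop crop_name seasonMapping.items

-- ===== PORT B =====
def cropToSeason : PySem.Dict String String := PySem.Dict.ofList [
  ("Jowar (Sorghum)", "Kharif"),
  ("Bajra (Pearl Millet)", "Kharif"),
  ("Rice", "Kharif"),
  ("Tur (Pigeon Pea)", "Kharif"),
  ("Soybean", "Kharif"),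
  ("Cotton", "Kharif"),
  ("Groundnut", "Kharif"),
  ("Maize", "Kharif"),
  ("Moong (Green Gram)", "Kharif"),
  ("Urad (Black Gram)", "Kharif"),
  ("Wheat", "Rabi"),
  ("Chickpea", "Rabi"),
  ("Sunflower", "Rabi"),
  ("Safflower", "Rabi"),
  ("Onion", "Rabi"),
  ("Cabbage", "Rabi"),
  ("Cauliflower", "Rabi"),
  ("Potato", "Rabi"),
  ("Sugarcane", "Year-round"),
  ("Tomato", "Year-round"),
  ("Brinjal", "Year-round"),
  ("Grapes", "Year-round"),
  ("Mango", "Year-round"),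
  ("Banana", "Year-round"),
  ("Orange", "Year-round"),
  ("Pomegranate", "Year-round"),
  ("Sapota", "Year-round"),
  ("Custard Apple", "Year-round"),
  ("Guava", "Year-round"),
  ("Papaya", "Year-round"),
]

def get_crop_season_alt (crop_name : String) : String :=
  cropToSeason.getD crop_name "Unknown"

-- ===== PRECONDITION & SPEC =====
def Spec_get_crop_season (crop_name : String) (out : String) : Prop := out = get_crop_season_alt crop_name
instance (crop_name : String) (out : String) : Decidable (Spec_get_crop_season crop_name out) := by unfold Spec_get_crop_season; infer_instance

-- ===== CLAIM (what is proved, stated in full; the proofs are below) =====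
def Claim_equal_get_crop_season : Prop := ∀ (crop_name : String), Dom_get_crop_season crop_name → Spec_get_crop_season crop_name (get_crop_season crop_name)

-- ===== LEMMAS AND PROOFS =====
theorem itemsA : seasonMapping.items = [("Kharif", ["Jowar (Sorghum)", "Bajra (Pearl Millet)", "Rice", "Tur (Pigeon Pea)", "Soybean", "Cotton", "Groundnut", "Maize", "Moong (Green Gram)", "Urad (Black Gram)"]), ("Rabi", ["Wheat", "Chickpea", "Sunflower", "Safflower", "Onion", "Cabbage", "Cauliflower", "Potato"]), ("Year-round", ["Sugarcane", "Tomato", "Brinjal", "Grapes", "Mango", "Banana", "Orange", "Pomegranate", "Sapota", "Custard Apple", "Guava", "Papaya"])] := by decide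

theorem itemsB : cropToSeason.items = [("Jowar (Sorghum)", "Kharif"), ("Bajra (Pearl Millet)", "Kharif"), ("Rice", "Kharif"), ("Tur (Pigeon Pea)", "Kharif"), ("Soybean", "Kharif"), ("Cotton", "Kharif"), ("Groundnut", "Kharif"), ("Maize", "Kharif"), ("Moong (Green Gram)", "Kharif"), ("Urad (Black Gram)", "Kharif"), ("Wheat", "Rabi"), ("Chickpea", "Rabi"), ("Sunflower", "Rabi"), ("Safflower", "Rabi"), ("Onion", "Rabi"), ("Cabbage", "Rabi"), ("Cauliflower", "Rabi"), ("Potato", "Rabi"), ("Sugarcane", "Year-round"), ("Tomato", "Year-round"), ("Brinjal", "Year-round"), ("Grapes", "Year-round"), ("Mango", "Year-round"), ("Banana", "Year-round"), ("Orange", "Year-round"), ("Pomegranate", "Year-round"), ("Sapota", "Year-round"), ("Custard Apple", "Year-round"), ("Guava", "Year-round"), ("Papaya", "Year-round")] := by decide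

theorem get_crop_season_eq (c : String) : get_crop_season c = get_crop_season_alt c := by
  by_cases h0 : c = "Jowar (Sorghum)"
  · subst h0; decide
  by_cases h1 : c = "Bajra (Pearl Millet)"
  · subst h1; decide
  by_cases h2 : c = "Rice"
  · subst h2; decide
  by_cases h3 : c = "Tur (Pigeon Pea)"
  · subst h3; decide
  by_cases h4 : c = "Soybean"
  · subst h4; decide
  by_cases h5 : c = "Cotton"
  · subst h5; decide
  by_cases h6 : c = "Groundnut"
  · subst h6; decide
  by_cases h7 : c = "Maize"
  · subst h7; decide
  by_cases h8 : c = "Moong (Green Gram)"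
  · subst h8; decide
  by_cases h9 : c = "Urad (Black Gram)"
  · subst h9; decide
  by_cases h10 : c = "Wheat"
  · subst h10; decide
  by_cases h11 : c = "Chickpea"
  · subst h11; decide
  by_cases h12 : c = "Sunflower"
  · subst h12; decide
  by_cases h13 : c = "Safflower"
  · subst h13; decide
  by_cases h14 : c = "Onion"
  · subst h14; decide
  by_cases h15 : c = "Cabbage"
  · subst h15; decide
  by_cases h16 : c = "Cauliflower"
  · subst h16; decide
  by_cases h17 : c = "Potato"
  · subst h17; decide
  by_cases h18 : c = "Sugarcane"
  · subst h18; decide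
  by_cases h19 : c = "Tomato"
  · subst h19; decide
  by_cases h20 : c = "Brinjal"
  · subst h20; decide
  by_cases h21 : c = "Grapes"
  · subst h21; decide
  by_cases h22 : c = "Mango"
  · subst h22; decide
  by_cases h23 : c = "Banana"
  · subst h23; decide
  by_cases h24 : c = "Orange"
  · subst h24; decide
  by_cases h25 : c = "Pomegranate"
  · subst h25; decide
  by_cases h26 : c = "Sapota"
  · subst h26; decide
  by_cases h27 : c = "Custard Apple"
  · subst h27; decide
  by_cases h28 : c = "Guava"
  · subst h28; decide
  by_cases h29 : c = "Papaya"
  · subst h29; decide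
  simp only [get_crop_season, get_crop_season_alt, PySem.Dict.getD, PySem.Dict.get?, itemsA, itemsB]
  have hf : List.find? (fun p => p.1 == c) cropToSeason.items = none := by
    rw [List.find?_eq_none]
    intro x hx
    rw [itemsB] at hx
    fin_cases hx <;> simp [Ne.symm h0, Ne.symm h1, Ne.symm h2, Ne.symm h3, Ne.symm h4, Ne.symm h5, Ne.symm h6, Ne.symm h7, Ne.symm h8, Ne.symm h9, Ne.symm h10, Ne.symm h11, Ne.symm h12, Ne.symm h13, Ne.symm h14, Ne.symm h15, Ne.symm h16, Ne.symm h17, Ne.symm h18, Ne.symm h19, Ne.symm h20, Ne.symm h21, Ne.symm h22, Ne.symm h23, Ne.symm h24, Ne.symm h25, Ne.symm h26, Ne.symm h27, Ne.symm h28, Ne.symm h29]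
  rw [itemsB] at hf
  rw [hf]
  simp [seasonLoop, h0, h1, h2, h3, h4, h5, h6, h7, h8, h9, h10, h11, h12, h13, h14, h15, h16, h17, h18, h19, h20, h21, h22, h23, h24, h25, h26, h27, h28, h29]

-- ===== VERDICT (by name: the statement is the Claim_ definition above) =====
theorem get_crop_season_spec : Claim_equal_get_crop_season := by
  intro c _
  unfold Spec_get_crop_season
  exact get_crop_season_eq c
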